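-- pv_equiv track=rewrite | github.com/TristanTrim/randcastles | randcastles.py | makeit
-- ===== SOURCE A (Python) =====
-- def lifereq(view,lifemn=2,lifemx=2):
--     return ( sum(view) >= lifemn
--             and sum(view) <= lifemx )
--
-- def it(foo,down = 5, up = 5,lifemn=3,lifemx=3):
--     newfoo = [0]*len(foo)
--     for i in range(len(foo)):
--         start = max(0,i-down)
--         end = min(len(foo),i+1+up)
--         if lifereq(foo[start:end],lifemn=lifemn,lifemx=lifemx):
--             newfoo[i] = 1
--     return newfoo
--
-- def makeit(foo,down = 5,up=5,lifemn=3,lifemx=3):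
--     randcastle = []
--     for i in range(500):
--     #while True:
--         randcastle += [foo]
--         newfoo = it(foo,down=down,up=up,lifemn=lifemn,lifemx=lifemx)
--         if newfoo == foo:
--             break
--         foo = newfoo
--
--     return randcastle
-- ===== SOURCE B (Python) =====
-- def makeit(foo, down=5, up=5, lifemn=3, lifemx=3):
--     # Prefix-sum sliding-window automaton: each generation in O(n) from one
--     # prefix-sum pass; iterate until stable or 500 generations.
--     n = len(foo)
--
--     def step(cur):
--         pref = [0]
--         t = 0
--         for v in cur:
--             t += v
--             pref.append(t)
--         out = []
--         for i in range(n):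
--             s = max(0, i - down)
--             e = min(n, i + 1 + up)
--             w = pref[e] - pref[s] if s < e else 0
--             out.append(1 if lifemn <= w <= lifemx else 0)
--         return out
--
--     def go(cur, fuel):
--         if fuel == 0:
--             return []
--         nxt = step(cur)
--         if nxt == cur:
--             return [cur]
--         return [cur] + go(nxt, fuel - 1)
--
--     return go(foo, 500)
-- ===== Notes on version B (the rewrite author's own statement) =====
-- stated objective: faster
-- what changed: Each generation's per-cell window sums come from one prefix-sum pass (O(n) per generation) instead of summing a fresh slice per cell, and the iterate-until-stable loop is a recursion instead of an indexed for/break loop; Pre_ excludes up <= -2 (outside the natural nonnegative-radius domain), where A's end index i+1+up goes negative and Python's slice wraps it around the list.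
-- outside the precondition, e.g. on makeit([1, 0], 0, -2, 1, 1): A returns [[1, 0]], B returns [[1, 0], [0, 0]]
import Mathlib
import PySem

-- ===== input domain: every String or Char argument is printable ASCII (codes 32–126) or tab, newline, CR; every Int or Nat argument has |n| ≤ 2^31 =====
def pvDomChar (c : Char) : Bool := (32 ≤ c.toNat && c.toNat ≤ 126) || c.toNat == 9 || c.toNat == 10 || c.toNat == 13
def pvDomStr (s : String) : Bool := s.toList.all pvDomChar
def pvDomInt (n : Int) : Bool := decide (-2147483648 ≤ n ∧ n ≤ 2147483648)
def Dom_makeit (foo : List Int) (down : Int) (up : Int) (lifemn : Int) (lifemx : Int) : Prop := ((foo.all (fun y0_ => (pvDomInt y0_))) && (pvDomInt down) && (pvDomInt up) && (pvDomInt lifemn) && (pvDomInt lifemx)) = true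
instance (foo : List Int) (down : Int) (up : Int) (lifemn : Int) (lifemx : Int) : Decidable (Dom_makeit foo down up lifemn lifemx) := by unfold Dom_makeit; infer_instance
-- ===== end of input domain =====

-- B replaces A's per-cell slice summing by one prefix-sum pass per generation (asymptotically
-- faster per step) and writes the iterate-until-stable loop as a recursion; same return value on Pre_.

-- ===== PORT A =====
def lifereq (view : List Int) (lifemn : Int) (lifemx : Int) : Bool :=
  decide (lifemn ≤ view.sum) && decide (view.sum ≤ lifemx)

def it (foo : List Int) (down : Int) (up : Int) (lifemn : Int) (lifemx : Int) : List Int :=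
  (List.range foo.length).foldl
    (fun (newfoo : List Int) (i : Nat) =>
      let start : Int := max 0 ((i : Int) - down)
      let stop : Int := min (foo.length : Int) ((i : Int) + 1 + up)
      if lifereq (PySem.List.slice foo (some start) (some stop)) lifemn lifemx
      then newfoo.set i 1 else newfoo)
    (List.replicate foo.length 0)

-- the 'for i in range(500): … if newfoo == foo: break' loop, counter + early return
def makeitLoop (down : Int) (up : Int) (lifemn : Int) (lifemx : Int) :
    Nat → List (List Int) → List Int → List (List Int)
  | 0, randcastle, _ => randcastle
  | fuel+1, randcastle, foo =>
      let randcastle := randcastle ++ [foo]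
      let newfoo := it foo down up lifemn lifemx
      if newfoo = foo then randcastle
      else makeitLoop down up lifemn lifemx fuel randcastle newfoo

def makeit (foo : List Int) (down : Int) (up : Int) (lifemn : Int) (lifemx : Int) : List (List Int) :=
  makeitLoop down up lifemn lifemx 500 [] foo

-- ===== PORT B =====
-- running-total prefix-sum list pref, pref[k] = sum of the first k cells
def prefAlt (cur : List Int) : List Int :=
  (cur.foldl (fun (st : List Int × Int) v => (st.1 ++ [st.2 + v], st.2 + v)) ([0], 0)).1

def cellAlt (n : Nat) (pref : List Int) (down : Int) (up : Int) (lifemn : Int) (lifemx : Int)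
    (i : Nat) : Int :=
  let s : Int := max 0 ((i : Int) - down)
  let e : Int := min (n : Int) ((i : Int) + 1 + up)
  let w : Int := if s < e then PySem.List.pyGetD pref e 0 - PySem.List.pyGetD pref s 0 else 0
  if lifemn ≤ w ∧ w ≤ lifemx then 1 else 0

def stepAlt (down : Int) (up : Int) (lifemn : Int) (lifemx : Int) (cur : List Int) : List Int :=
  (List.range cur.length).map (cellAlt cur.length (prefAlt cur) down up lifemn lifemx)

def goAlt (down : Int) (up : Int) (lifemn : Int) (lifemx : Int) (cur : List Int) :
    Nat → List (List Int)
  | 0 => []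
  | fuel+1 =>
      let nxt := stepAlt down up lifemn lifemx cur
      if nxt = cur then [cur] else cur :: goAlt down up lifemn lifemx nxt fuel

def makeit_alt (foo : List Int) (down : Int) (up : Int) (lifemn : Int) (lifemx : Int) : List (List Int) :=
  goAlt down up lifemn lifemx foo 500

-- ===== PRECONDITION & SPEC =====
-- Pre_ excludes up ≤ -2 (outside the natural nonnegative-radius domain): there A's end index
-- i+1+up goes negative for small i and Python's slice wraps it around the list — an accident of
-- slice semantics, which B (empty window) does not reproduce.
def Pre_makeit (foo : List Int) (down : Int) (up : Int) (lifemn : Int) (lifemx : Int) : Prop :=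
  -1 ≤ up
instance (foo : List Int) (down : Int) (up : Int) (lifemn : Int) (lifemx : Int) : Decidable (Pre_makeit foo down up lifemn lifemx) := by unfold Pre_makeit; infer_instance

def pvWitness_makeit : List Int × Int × Int × Int × Int := ([1, 0, 1], 1, 1, 1, 2)

def Spec_makeit (foo : List Int) (down : Int) (up : Int) (lifemn : Int) (lifemx : Int) (out : List (List Int)) : Prop := out = makeit_alt foo down up lifemn lifemx
instance (foo : List Int) (down : Int) (up : Int) (lifemn : Int) (lifemx : Int) (out : List (List Int)) : Decidable (Spec_makeit foo down up lifemn lifemx out) := by unfold Spec_makeit; infer_instance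

-- ===== CLAIM (what is proved, stated in full; the proofs are below) =====
def Claim_equal_makeit : Prop := ∀ (foo : List Int) (down : Int) (up : Int) (lifemn : Int) (lifemx : Int), Dom_makeit foo down up lifemn lifemx → Pre_makeit foo down up lifemn lifemx → Spec_makeit foo down up lifemn lifemx (makeit foo down up lifemn lifemx)

-- ===== LEMMAS AND PROOFS =====

theorem prefAlt_fold (cur : List Int) : ∀ (acc : List Int) (t : Int),
    (cur.foldl (fun (st : List Int × Int) v => (st.1 ++ [st.2 + v], st.2 + v)) (acc, t)).1
      = acc ++ (List.range cur.length).map (fun k => t + (cur.take (k+1)).sum) := by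
  induction cur with
  | nil => simp
  | cons v vs ih =>
      intro acc t
      rw [List.foldl_cons, ih]
      rw [List.length_cons, List.range_succ_eq_map, List.map_cons, List.map_map]
      simp [Function.comp_def, Nat.succ_eq_add_one, add_assoc, List.append_assoc]

theorem prefAlt_eq (cur : List Int) :
    prefAlt cur = (List.range (cur.length + 1)).map (fun k => (cur.take k).sum) := by
  unfold prefAlt
  rw [prefAlt_fold, List.range_succ_eq_map, List.map_cons, List.map_map]
  simp [Function.comp_def]

theorem prefAlt_get (cur : List Int) (j : Int) (h0 : 0 ≤ j) (h1 : j ≤ (cur.length : Int)) :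
    PySem.List.pyGetD (prefAlt cur) j 0 = (cur.take j.toNat).sum := by
  rw [prefAlt_eq, PySem.List.pyGetD_of_nonneg _ _ h0,
    PySem.List.getD_map_range _ _ _ _ (by omega)]

theorem sum_take_sub (foo : List Int) (a b : Nat) (hab : a ≤ b) :
    ((foo.drop a).take (b - a)).sum = (foo.take b).sum - (foo.take a).sum := by
  have h : List.take (a + (b - a)) foo
      = List.take a foo ++ List.take (b - a) (List.drop a foo) := List.take_add
  rw [show a + (b - a) = b by omega] at h
  rw [h, List.sum_append]
  ring

-- characterisation of A's set-loop
theorem setFold_getD (c : Nat → Bool) : ∀ (js : List Nat) (l : List Int) (i : Nat),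
    (js.foldl (fun acc j => if c j then acc.set j 1 else acc) l).getD i 0
      = if i ∈ js ∧ c i = true ∧ i < l.length then 1 else l.getD i 0 := by
  intro js
  induction js with
  | nil => simp
  | cons j js ih =>
      intro l i
      rw [List.foldl_cons, ih]
      by_cases hcj : c j = true
      · by_cases hij : i = j
        · subst hij
          by_cases hlen : i < l.length <;>
            simp [hcj, hlen, List.getD_eq_getElem?_getD]
        · simp [hcj, List.mem_cons, hij, List.getD_eq_getElem?_getD,
            (show ¬ j = i from fun h => hij h.symm)]
      · simp only [hcj]
        by_cases hij : i = j
        · subst hij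
          simp [hcj]
        · simp [List.mem_cons, hij]

theorem setFold_length (c : Nat → Bool) : ∀ (js : List Nat) (l : List Int),
    (js.foldl (fun acc j => if c j then acc.set j 1 else acc) l).length = l.length := by
  intro js
  induction js with
  | nil => simp
  | cons j js ih => intro l; rw [List.foldl_cons, ih]; split_ifs <;> simp

theorem it_eq_map (foo : List Int) (down up lifemn lifemx : Int) :
    it foo down up lifemn lifemx
      = (List.range foo.length).map (fun (i : Nat) =>
          if lifereq (PySem.List.slice foo (some (max 0 ((i : Int) - down)))
              (some (min (foo.length : Int) ((i : Int) + 1 + up)))) lifemn lifemx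
          then (1 : Int) else 0) := by
  unfold it
  apply List.ext_getElem
  · rw [setFold_length]; simp
  · intro i h1 h2
    have hi : i < foo.length := by
      rw [setFold_length] at h1; simpa using h1
    rw [← List.getD_eq_getElem _ 0 h1, ← List.getD_eq_getElem _ 0 h2]
    rw [setFold_getD, PySem.List.getD_map_range _ _ _ _ hi]
    simp [List.mem_range, hi]

theorem cell_eq (foo : List Int) (down up lifemn lifemx : Int) (hup : -1 ≤ up) (i : Nat) :
    cellAlt foo.length (prefAlt foo) down up lifemn lifemx i
      = (if lifereq (PySem.List.slice foo (some (max 0 ((i : Int) - down)))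
            (some (min (foo.length : Int) ((i : Int) + 1 + up)))) lifemn lifemx
         then (1 : Int) else 0) := by
  have hslice : PySem.List.slice foo (some (max 0 ((i : Int) - down)))
        (some (min (foo.length : Int) ((i : Int) + 1 + up)))
      = (foo.drop (PySem.List.clampIdx foo.length (max 0 ((i : Int) - down)))).take
          (PySem.List.clampIdx foo.length (min (foo.length : Int) ((i : Int) + 1 + up))
            - PySem.List.clampIdx foo.length (max 0 ((i : Int) - down))) := rfl
  set n := foo.length with hn
  set a : Nat := PySem.List.clampIdx n (max 0 ((i : Int) - down)) with ha
  set b : Nat := PySem.List.clampIdx n (min (n : Int) ((i : Int) + 1 + up)) with hb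
  have han : a ≤ n := by rw [ha]; unfold PySem.List.clampIdx; split_ifs <;> omega
  have hbn : b ≤ n := by rw [hb]; unfold PySem.List.clampIdx; split_ifs <;> omega
  simp only [cellAlt, lifereq]
  have hw : (if max 0 ((i : Int) - down) < min (n : Int) ((i : Int) + 1 + up)
        then PySem.List.pyGetD (prefAlt foo) (min (n : Int) ((i : Int) + 1 + up)) 0
          - PySem.List.pyGetD (prefAlt foo) (max 0 ((i : Int) - down)) 0 else 0)
      = (List.take (b - a) (List.drop a foo)).sum := by
    by_cases hse : max 0 ((i : Int) - down) < min (n : Int) ((i : Int) + 1 + up)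
    · have haI : ((a : Nat) : Int) = max 0 ((i : Int) - down) := by
        rw [ha]; unfold PySem.List.clampIdx; split_ifs <;> omega
      have hbI : ((b : Nat) : Int) = min (n : Int) ((i : Int) + 1 + up) := by
        rw [hb]; unfold PySem.List.clampIdx; split_ifs <;> omega
      rw [if_pos hse, ← haI, ← hbI]
      have hab : a < b := by omega
      rw [prefAlt_get foo ((b : Nat) : Int) (Int.natCast_nonneg b) (by exact_mod_cast hbn),
        prefAlt_get foo ((a : Nat) : Int) (Int.natCast_nonneg a) (by exact_mod_cast han)]
      rw [Int.toNat_natCast, Int.toNat_natCast, sum_take_sub foo a b hab.le]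
    · rw [if_neg hse]
      have hba : b ≤ a := by
        rw [ha, hb]; unfold PySem.List.clampIdx; split_ifs <;> omega
      rw [show b - a = 0 by omega]
      simp
  rw [hslice, hw]
  simp only [Bool.and_eq_true, decide_eq_true_eq]

theorem it_eq_stepAlt (foo : List Int) (down up lifemn lifemx : Int) (hup : -1 ≤ up) :
    it foo down up lifemn lifemx = stepAlt down up lifemn lifemx foo := by
  rw [it_eq_map]
  unfold stepAlt
  exact List.map_congr_left (fun i _ => (cell_eq foo down up lifemn lifemx hup i).symm)

theorem loop_eq (down up lifemn lifemx : Int) (hup : -1 ≤ up) :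
    ∀ (fuel : Nat) (rc : List (List Int)) (foo : List Int),
    makeitLoop down up lifemn lifemx fuel rc foo = rc ++ goAlt down up lifemn lifemx foo fuel := by
  intro fuel
  induction fuel with
  | zero => intro rc foo; simp [makeitLoop, goAlt]
  | succ n ih =>
      intro rc foo
      simp only [makeitLoop, goAlt, it_eq_stepAlt _ _ _ _ _ hup]
      split_ifs with h
      · simp
      · rw [ih]; simp

-- ===== VERDICT (by name: the statement is the Claim_ definition above) =====
theorem makeit_spec : Claim_equal_makeit := by
  intro foo down up lifemn lifemx _ hpre
  unfold Spec_makeit makeit makeit_alt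
  simpa using loop_eq down up lifemn lifemx hpre 500 [] foo
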